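-- pv_equiv track=rewrite | github.com/taminomara/yuio | yuio/color.py | _rgb_to_256
-- ===== SOURCE A (Python) =====
-- def _rgb_to_256(r: int, g: int, b: int) -> int:
--     closest_idx = lambda x, vals: min((abs(x - v), i) for i, v in enumerate(vals))[1]
--     color_components = [0x00, 0x5F, 0x87, 0xAF, 0xD7, 0xFF]
--
--     if r == g == b:
--         i = closest_idx(r, color_components + [0x08 + 10 * i for i in range(24)])
--         if i >= len(color_components):
--             return 232 + i - len(color_components)
--         r, g, b = i, i, i
--     else:
--         r, g, b = (closest_idx(x, color_components) for x in (r, g, b))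
--     return r * 36 + g * 6 + b + 16
-- ===== SOURCE B (Python) =====
-- def _rgb_to_256(r: int, g: int, b: int) -> int:
--     def level(x):
--         # nearest of [0,95,135,175,215,255]; ties at midpoints go to the lower level
--         if x <= 47:
--             return 0, 0
--         if x <= 115:
--             return 1, 95
--         if x <= 155:
--             return 2, 135
--         if x <= 195:
--             return 3, 175
--         if x <= 235:
--             return 4, 215
--         return 5, 255
--
--     if r == g == b:
--         ci, cv = level(r)
--         k = (r - 4) // 10          # nearest gray-ramp step 8+10k, ties to lower k
--         if k < 0:
--             k = 0
--         elif k > 23: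
--             k = 23
--         if abs(r - (8 + 10 * k)) < abs(r - cv):   # ties favour the colour cube
--             return 232 + k
--         return 43 * ci + 16
--     return 36 * level(r)[0] + 6 * level(g)[0] + level(b)[0] + 16
-- ===== Notes on version B (the rewrite author's own statement) =====
-- stated objective: faster
-- what changed: Replaces the min-scan over an enumerated candidate list (6 components, 30 in the gray case) with closed-form threshold comparisons for the nearest cube component and floor-division for the nearest gray-ramp step, comparing only the two resulting distances.
import Mathlib
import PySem

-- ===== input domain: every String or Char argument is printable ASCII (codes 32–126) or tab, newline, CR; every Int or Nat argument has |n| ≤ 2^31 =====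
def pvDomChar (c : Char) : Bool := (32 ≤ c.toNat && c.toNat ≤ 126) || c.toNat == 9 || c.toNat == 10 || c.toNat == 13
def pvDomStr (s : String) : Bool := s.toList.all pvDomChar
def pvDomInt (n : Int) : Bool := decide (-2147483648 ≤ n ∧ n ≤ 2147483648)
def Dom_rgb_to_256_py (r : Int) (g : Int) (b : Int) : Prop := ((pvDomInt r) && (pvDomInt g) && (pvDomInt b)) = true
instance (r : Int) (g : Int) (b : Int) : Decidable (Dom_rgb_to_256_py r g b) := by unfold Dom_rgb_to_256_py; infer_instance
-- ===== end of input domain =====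

-- B replaces A's min-scans over enumerated candidate lists with closed-form threshold
-- comparisons and one floor-division (objective: faster by a constant factor).


-- ===== PORT A =====
-- Python min over a generator of tuples: first element is the initial best,
-- a later candidate replaces it only if strictly smaller in lexicographic order.
def pvMinStep (cur e : Int × Int) : Int × Int :=
  if e.1 < cur.1 ∨ (e.1 = cur.1 ∧ e.2 < cur.2) then e else cur

-- closest_idx = lambda x, vals: min((abs(x - v), i) for i, v in enumerate(vals))[1]
def pvClosestIdx (x : Int) (vals : List Int) : Int :=
  match (PySem.List.enumerate vals 0).map (fun p => (|x - p.2|, p.1)) with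
  | [] => 0          -- Python raises ValueError on an empty generator; never reached here
  | h :: t => (t.foldl pvMinStep h).2

def rgb_to_256_py (r : Int) (g : Int) (b : Int) : Int :=
  let cc : List Int := [0x00, 0x5F, 0x87, 0xAF, 0xD7, 0xFF]
  if r = g ∧ g = b then
    let i := pvClosestIdx r (cc ++ (PySem.List.pyRange 0 24 1).map (fun j => 8 + 10 * j))
    if i ≥ (cc.length : Int) then 232 + i - (cc.length : Int)
    else i * 36 + i * 6 + i + 16
  else
    (pvClosestIdx r cc) * 36 + (pvClosestIdx g cc) * 6 + (pvClosestIdx b cc) + 16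

-- ===== PORT B =====
-- level(x) = (index, value) of the nearest of [0,95,135,175,215,255], ties to the lower level
def pvLevel (x : Int) : Int × Int :=
  if x ≤ 47 then (0, 0)
  else if x ≤ 115 then (1, 95)
  else if x ≤ 155 then (2, 135)
  else if x ≤ 195 then (3, 175)
  else if x ≤ 235 then (4, 215)
  else (5, 255)

def rgb_to_256_py_alt (r : Int) (g : Int) (b : Int) : Int :=
  if r = g ∧ g = b then
    let ci := (pvLevel r).1
    let cv := (pvLevel r).2
    let k0 := PySem.Int.floordiv (r - 4) 10   -- nearest gray-ramp step 8+10k, ties to lower k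
    let k := if k0 < 0 then 0 else if k0 > 23 then 23 else k0
    if |r - (8 + 10 * k)| < |r - cv| then 232 + k   -- ties favour the colour cube
    else 43 * ci + 16
  else 36 * (pvLevel r).1 + 6 * (pvLevel g).1 + (pvLevel b).1 + 16

-- ===== PRECONDITION & SPEC =====
def Spec_rgb_to_256_py (r : Int) (g : Int) (b : Int) (out : Int) : Prop := out = rgb_to_256_py_alt r g b
instance (r : Int) (g : Int) (b : Int) (out : Int) : Decidable (Spec_rgb_to_256_py r g b out) := by unfold Spec_rgb_to_256_py; infer_instance

-- ===== CLAIM (what is proved, stated in full; the proofs are below) =====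
def Claim_equal_rgb_to_256_py : Prop := ∀ (r : Int) (g : Int) (b : Int), Dom_rgb_to_256_py r g b → Spec_rgb_to_256_py r g b (rgb_to_256_py r g b)

-- ===== LEMMAS AND PROOFS =====

-- the fold keeps its current best when every remaining candidate is strictly worse (or equal to it)
theorem pvFold_stay (l : List (Int × Int)) (cur : Int × Int)
    (h : ∀ e ∈ l, cur.1 < e.1 ∨ e = cur) : l.foldl pvMinStep cur = cur := by
  induction l with
  | nil => rfl
  | cons a t ih =>
      have ha := h a (by simp)
      have hstep : pvMinStep cur a = cur := by
        rcases ha with ha | ha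
        · simp [pvMinStep]; omega
        · subst ha; simp [pvMinStep]
      rw [List.foldl_cons, hstep]
      exact ih fun e he => h e (by simp [he])

-- the fold returns the unique strict minimum of the candidate list
theorem pvFold_min (l : List (Int × Int)) (cur e : Int × Int)
    (hmem : e ∈ l) (hmin : ∀ p ∈ l, p ≠ e → e.1 < p.1) (hcur : e.1 < cur.1) :
    l.foldl pvMinStep cur = e := by
  induction l generalizing cur with
  | nil => cases hmem
  | cons a t ih =>
      rw [List.foldl_cons]
      by_cases hae : a = e
      · subst hae
        have hstep : pvMinStep cur a = a := by simp [pvMinStep]; omega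
        rw [hstep]
        exact pvFold_stay t a fun p hp => by
          by_cases hpe : p = a
          · exact Or.inr hpe
          · exact Or.inl (hmin p (by simp [hp]) hpe)
      · have hat : e ∈ t := by
          rcases List.mem_cons.mp hmem with h | h
          · exact absurd h.symm hae
          · exact h
        
        have hlt : e.1 < a.1 := hmin a (by simp) hae
        have hcur2 : e.1 < (pvMinStep cur a).1 := by
          simp only [pvMinStep]; split <;> omega
        exact ih (pvMinStep cur a) hat (fun p hp hpe => hmin p (List.mem_cons_of_mem _ hp) hpe) hcur2

set_option maxRecDepth 10000 in
theorem lem6_small : ∀ n : Nat, n < 256 → pvClosestIdx (n:Int) [0,95,135,175,215,255] = (pvLevel (n:Int)).1 := by decide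

set_option maxRecDepth 100000 in
theorem lemGray_small : ∀ n : Nat, n < 256 → rgb_to_256_py (n:Int) (n:Int) (n:Int) = rgb_to_256_py_alt (n:Int) (n:Int) (n:Int) := by decide

theorem h6test (x : Int) : pvClosestIdx x [0,95,135,175,215,255] = ([(|x-95|,1),(|x-135|,2),(|x-175|,3),(|x-215|,4),(|x-255|,5)].foldl pvMinStep (|x-0|,0)).2 := rfl

theorem lem6_neg (x : Int) (hx : x < 0) : pvClosestIdx x [0,95,135,175,215,255] = 0 := by
  rw [h6test]
  rw [pvFold_stay _ _ ?_]
  · intro e he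
    fin_cases he <;> (left; dsimp only; simp only [Int.abs_eq_natAbs]; omega)

theorem lem6_big (x : Int) (hx : 255 < x) : pvClosestIdx x [0,95,135,175,215,255] = 5 := by
  rw [h6test]
  rw [pvFold_min _ _ (|x - 255|, 5) (by simp) ?_ (by dsimp only; simp only [Int.abs_eq_natAbs]; omega)]
  · intro p hp hpe
    fin_cases hp
    · dsimp only; simp only [Int.abs_eq_natAbs]; omega
    · dsimp only; simp only [Int.abs_eq_natAbs]; omega
    · dsimp only; simp only [Int.abs_eq_natAbs]; omega
    · dsimp only; simp only [Int.abs_eq_natAbs]; omega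
    · exact absurd rfl hpe

theorem hGtest (x : Int) : pvClosestIdx x ([0, 95, 135, 175, 215, 255] ++ (PySem.List.pyRange 0 24 1).map (fun j => 8 + 10 * j)) =
    ([(|x-95|,1),(|x-135|,2),(|x-175|,3),(|x-215|,4),(|x-255|,5),
      (|x-8|,6),(|x-18|,7),(|x-28|,8),(|x-38|,9),(|x-48|,10),(|x-58|,11),(|x-68|,12),(|x-78|,13),
      (|x-88|,14),(|x-98|,15),(|x-108|,16),(|x-118|,17),(|x-128|,18),(|x-138|,19),(|x-148|,20),
      (|x-158|,21),(|x-168|,22),(|x-178|,23),(|x-188|,24),(|x-198|,25),(|x-208|,26),(|x-218|,27),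
      (|x-228|,28),(|x-238|,29)].foldl pvMinStep (|x-0|,0)).2 := rfl

theorem lemGray_neg_idx (x : Int) (hx : x < 0) :
    pvClosestIdx x ([0, 95, 135, 175, 215, 255] ++ (PySem.List.pyRange 0 24 1).map (fun j => 8 + 10 * j)) = 0 := by
  rw [hGtest]
  rw [pvFold_stay _ _ ?_]
  · intro e he
    fin_cases he <;> (left; dsimp only; simp only [Int.abs_eq_natAbs]; omega)

theorem lemGray_big_idx (x : Int) (hx : 255 < x) :
    pvClosestIdx x ([0, 95, 135, 175, 215, 255] ++ (PySem.List.pyRange 0 24 1).map (fun j => 8 + 10 * j)) = 5 := by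
  rw [hGtest]
  rw [pvFold_min _ _ (|x - 255|, 5) (by simp) ?_ (by dsimp only; simp only [Int.abs_eq_natAbs]; omega)]
  · intro p hp hpe
    fin_cases hp <;> first
      | exact absurd rfl hpe
      | (dsimp only; simp only [Int.abs_eq_natAbs]; omega)

theorem lemGray (x : Int) : rgb_to_256_py x x x = rgb_to_256_py_alt x x x := by
  by_cases h0 : x < 0
  · have hA : rgb_to_256_py x x x = 16 := by
      simp only [rgb_to_256_py, and_self, if_true]
      rw [lemGray_neg_idx x h0]
      norm_num
    have hB : rgb_to_256_py_alt x x x = 16 := by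
      simp only [rgb_to_256_py_alt, and_self, if_true]
      have hk : PySem.Int.floordiv (x - 4) 10 < 0 := by
        rw [PySem.Int.floordiv_lt_iff_lt_mul (by omega)]; omega
      rw [if_pos hk]
      rw [show pvLevel x = (0, 0) from by simp only [pvLevel, if_pos (show x ≤ 47 by omega)]]
      rw [if_neg (by dsimp only; simp only [Int.abs_eq_natAbs]; omega)]
      norm_num
    rw [hA, hB]
  · by_cases h1 : x ≤ 255
    · have hx : x = ((x.toNat : Nat) : Int) := by omega
      rw [hx]
      exact lemGray_small x.toNat (by omega)
    · have hA : rgb_to_256_py x x x = 231 := by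
        simp only [rgb_to_256_py, and_self, if_true]
        rw [lemGray_big_idx x (by omega)]
        norm_num
      have hB : rgb_to_256_py_alt x x x = 231 := by
        simp only [rgb_to_256_py_alt, and_self, if_true]
        have hk0 : ¬ PySem.Int.floordiv (x - 4) 10 < 0 := by
          rw [PySem.Int.floordiv_lt_iff_lt_mul (by omega)]; omega
        have hk1 : PySem.Int.floordiv (x - 4) 10 > 23 := by
          show 23 < _
          rw [show (23:Int) < PySem.Int.floordiv (x-4) 10 ↔ 23 + 1 ≤ PySem.Int.floordiv (x-4) 10 from by omega]
          rw [PySem.Int.le_floordiv_iff_mul_le (by omega)]; omega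
        rw [if_neg hk0, if_pos hk1]
        rw [show pvLevel x = (5, 255) from by
          simp only [pvLevel, if_neg (show ¬ x ≤ 47 by omega), if_neg (show ¬ x ≤ 115 by omega),
            if_neg (show ¬ x ≤ 155 by omega), if_neg (show ¬ x ≤ 195 by omega),
            if_neg (show ¬ x ≤ 235 by omega)]]
        rw [if_neg (by dsimp only; simp only [Int.abs_eq_natAbs]; omega)]
        norm_num
      rw [hA, hB]

theorem lem6 (x : Int) : pvClosestIdx x [0,95,135,175,215,255] = (pvLevel x).1 := by
  by_cases h0 : x < 0
  · rw [lem6_neg x h0, show pvLevel x = (0,0) from by simp only [pvLevel, if_pos (show x ≤ 47 by omega)]]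
  · by_cases h1 : x ≤ 255
    · have hx : x = ((x.toNat : Nat) : Int) := by omega
      rw [hx]
      exact lem6_small x.toNat (by omega)
    · rw [lem6_big x (by omega), show pvLevel x = (5,255) from by
        simp only [pvLevel, if_neg (show ¬ x ≤ 47 by omega), if_neg (show ¬ x ≤ 115 by omega),
          if_neg (show ¬ x ≤ 155 by omega), if_neg (show ¬ x ≤ 195 by omega),
          if_neg (show ¬ x ≤ 235 by omega)]]

-- ===== VERDICT (by name: the statement is the Claim_ definition above) =====
theorem rgb_to_256_py_spec : Claim_equal_rgb_to_256_py := by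
  intro r g b _
  unfold Spec_rgb_to_256_py
  by_cases h : r = g ∧ g = b
  · obtain ⟨rfl, rfl⟩ := h
    exact lemGray r
  · simp only [rgb_to_256_py, rgb_to_256_py_alt, if_neg h]
    rw [lem6, lem6, lem6]
    ring
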